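-- pv_equiv track=rewrite | github.com/Y-Tian/DataStructureRecap | hashtable.py | HashFuncString
-- ===== SOURCE A (Python) =====
-- def HashFuncString(string):
--     # order does matter
--     asciiTemp = 0
--     index = 1
--     for char in string:
--         sum = ord(char)
--         asciiTemp += sum*10+index
--         index += 1
--     return asciiTemp%13
-- ===== SOURCE B (Python) =====
-- def HashFuncString(string):
--     s = sum(ord(c) for c in string)
--     n = len(string)
--     return (10 * s + n * (n + 1) // 2) % 13
-- ===== Notes on version B (the rewrite author's own statement) =====
-- stated objective: simpler
-- what changed: B drops the maintained running-index state: it sums the character codes in one pass and adds the 1..n index contribution via the closed-form triangular number n*(n+1)//2 instead of accumulating 10*ord+index per step.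
import Mathlib
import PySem

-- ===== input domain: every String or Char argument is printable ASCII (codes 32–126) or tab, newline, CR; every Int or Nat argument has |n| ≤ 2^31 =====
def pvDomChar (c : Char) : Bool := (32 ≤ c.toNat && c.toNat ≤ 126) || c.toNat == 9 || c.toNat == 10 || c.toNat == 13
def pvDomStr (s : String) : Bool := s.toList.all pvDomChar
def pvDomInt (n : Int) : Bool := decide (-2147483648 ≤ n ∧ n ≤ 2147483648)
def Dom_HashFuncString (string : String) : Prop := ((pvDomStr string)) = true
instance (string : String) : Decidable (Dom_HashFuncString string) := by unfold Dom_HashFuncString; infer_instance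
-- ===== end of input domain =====

-- B replaces A's per-character running-index accumulation with a plain code sum plus the closed-form triangular number (simpler decomposition).

-- ===== PORT A =====
-- one loop carrying (asciiTemp, index); asciiTemp += ord(char)*10 + index; index += 1
def HashFuncString (string : String) : Int :=
  let st := string.toList.foldl
    (fun (st : Int × Int) (char : Char) =>
      (st.1 + (char.toNat : Int) * 10 + st.2, st.2 + 1))
    (0, 1)
  PySem.Int.mod st.1 13

-- ===== PORT B =====
def HashFuncString_alt (string : String) : Int :=
  let s : Int := (string.toList.map (fun c => (c.toNat : Int))).sum
  let n : Int := (string.toList.length : Int)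
  PySem.Int.mod (10 * s + PySem.Int.floordiv (n * (n + 1)) 2) 13

-- ===== PRECONDITION & SPEC =====
def Spec_HashFuncString (string : String) (out : Int) : Prop := out = HashFuncString_alt string
instance (string : String) (out : Int) : Decidable (Spec_HashFuncString string out) := by unfold Spec_HashFuncString; infer_instance

-- ===== CLAIM (what is proved, stated in full; the proofs are below) =====
def Claim_equal_HashFuncString : Prop := ∀ (string : String), Dom_HashFuncString string → Spec_HashFuncString string (HashFuncString string)

-- ===== LEMMAS AND PROOFS =====

-- invariant of A's loop, division-free: twice the accumulator
theorem pvHashFold (l : List Char) (a i : Int) :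
    2 * (l.foldl (fun (st : Int × Int) (char : Char) =>
      (st.1 + (char.toNat : Int) * 10 + st.2, st.2 + 1)) (a, i)).1 =
    2 * a + 20 * (l.map (fun c => (c.toNat : Int))).sum
      + (l.length : Int) * (2 * i + l.length - 1) := by
  induction l generalizing a i with
  | nil => simp
  | cons c t ih =>
    simp only [List.foldl_cons, List.map_cons, List.sum_cons, List.length_cons]
    have h := ih (a + (c.toNat:Int)*10 + i) (i+1)
    push_cast at h ⊢
    nlinarith [h]

-- ===== VERDICT (by name: the statement is the Claim_ definition above) =====
theorem HashFuncString_spec : Claim_equal_HashFuncString := by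
  intro s _
  unfold Spec_HashFuncString HashFuncString HashFuncString_alt
  have h := pvHashFold s.toList 0 1
  set T := (s.toList.foldl (fun (st : Int × Int) (char : Char) =>
      (st.1 + (char.toNat : Int) * 10 + st.2, st.2 + 1)) (0, 1)).1 with hT
  set S := (s.toList.map (fun c => (c.toNat : Int))).sum with hS
  set n : Int := (s.toList.length : Int) with hn
  simp only []
  congr 1
  have hx : n * (n + 1) = 2 * (T - 10 * S) := by nlinarith [h]
  rw [hx, PySem.Int.floordiv_eq_ediv_of_pos (by omega),
    Int.mul_ediv_cancel_left _ (by omega)]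
  ring
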